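-- pv_equiv track=rewrite | github.com/VisActor/vinfo-graphics | vinfo-graphics-skill/scripts/fetch_icons.py | find_best_collection
-- ===== SOURCE A (Python) =====
-- from collections import Counter
--
-- PREFERRED_COLLECTIONS = ["mdi", "fluent", "ph", "tabler", "solar", "fa6-solid", "carbon", "lucide", "bi"]
--
-- def find_best_collection(all_icons, prefer_collection=None):
--     """
--     从搜索结果中找到最佳统一图标集。
--     策略：选择搜索结果中出现频率最高的图标集，保持风格一致。
--     """
--     collection_counts = Counter()
--     for icon_id in all_icons:
--         if ":" in icon_id:
--             col = icon_id.split(":")[0]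
--             collection_counts[col] += 1
--
--     if not collection_counts:
--         return None
--
--     # 如果指定了偏好图标集，且该集有结果，优先使用
--     if prefer_collection and collection_counts.get(prefer_collection, 0) > 0:
--         return prefer_collection
--
--     # 按优先级和数量综合选择
--     best = None
--     best_score = -1
--     for col, count in collection_counts.items():
--         priority_bonus = 0
--         if col in PREFERRED_COLLECTIONS:
--             priority_bonus = (len(PREFERRED_COLLECTIONS) - PREFERRED_COLLECTIONS.index(col)) * 10
--         score = count + priority_bonus
--         if score > best_score:
--             best_score = score
--             best = col
--     return best
-- ===== SOURCE B (Python) =====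
-- from collections import Counter
--
-- PREFERRED_COLLECTIONS = ["mdi", "fluent", "ph", "tabler", "solar", "fa6-solid", "carbon", "lucide", "bi"]
--
-- def find_best_collection(all_icons, prefer_collection=None):
--     collection_counts = Counter()
--     for icon_id in all_icons:
--         if ":" in icon_id:
--             col = icon_id.split(":")[0]
--             collection_counts[col] += 1
--
--     if not collection_counts:
--         return None
--
--     if prefer_collection and collection_counts.get(prefer_collection, 0) > 0:
--         return prefer_collection
--
--     def score(item):
--         col, count = item
--         bonus = 0
--         if col in PREFERRED_COLLECTIONS:
--             bonus = (len(PREFERRED_COLLECTIONS) - PREFERRED_COLLECTIONS.index(col)) * 10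
--         return count + bonus
--
--     # stable sort on descending score: ties keep first-seen Counter order,
--     # matching the strict '>' scan of the original
--     ranked = sorted(collection_counts.items(), key=lambda item: -score(item))
--     return ranked[0][0]
-- ===== Notes on version B (the rewrite author's own statement) =====
-- stated objective: alternative
-- what changed: The best/best_score strict-'>' selection scan is replaced by scoring each counted collection once and taking the head of a stable sort on descending score (negated-score key), whose tie-breaking reproduces the first-seen-wins semantics; the Counter phase and the early returns are unchanged.
import Mathlib
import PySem

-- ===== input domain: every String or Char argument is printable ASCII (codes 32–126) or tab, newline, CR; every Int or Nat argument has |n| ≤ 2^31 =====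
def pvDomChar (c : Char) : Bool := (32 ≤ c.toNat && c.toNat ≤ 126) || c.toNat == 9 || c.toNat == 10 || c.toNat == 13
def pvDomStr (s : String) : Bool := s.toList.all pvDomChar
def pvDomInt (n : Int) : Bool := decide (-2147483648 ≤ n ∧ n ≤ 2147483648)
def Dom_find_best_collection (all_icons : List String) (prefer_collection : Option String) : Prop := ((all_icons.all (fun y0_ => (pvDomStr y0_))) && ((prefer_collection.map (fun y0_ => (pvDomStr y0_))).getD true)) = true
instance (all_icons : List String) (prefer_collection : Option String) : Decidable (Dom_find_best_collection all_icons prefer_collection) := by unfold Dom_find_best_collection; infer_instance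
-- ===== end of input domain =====

-- B replaces A's best/best_score strict-'>' scan by scoring every counted collection and
-- taking the head of a stable sort on descending score (objective: alternative, same cost).

-- shared module constant (same literal in both Python files)
def pvPreferred : List String := ["mdi", "fluent", "ph", "tabler", "solar", "fa6-solid", "carbon", "lucide", "bi"]

-- priority bonus: (len(PREFERRED_COLLECTIONS) - PREFERRED_COLLECTIONS.index(col)) * 10 if member else 0
def pvBonus (col : String) : Int :=
  if pvPreferred.contains col then
    ((pvPreferred.length : Int) - (((PySem.List.index? pvPreferred col).getD 0 : Nat) : Int)) * 10
  else 0

-- the Counter-building loop, identical source code in both Python files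
def pvCount (all_icons : List String) : PySem.Dict String Int :=
  all_icons.foldl (fun d icon_id =>
    if PySem.Str.isIn ":" icon_id then
      d.modify (((PySem.Str.split? icon_id ":").getD []).headD "") 0 (· + 1)
    else d) PySem.Dict.empty

-- ===== PORT A =====
def find_best_collection (all_icons : List String) (prefer_collection : Option String) : Option String :=
  let collection_counts := pvCount all_icons
  if collection_counts.items = [] then none
  else
    let scan :=
      (collection_counts.items.foldl (fun (st : Option String × Int) pc =>
        let priority_bonus := pvBonus pc.1
        let score := pc.2 + priority_bonus
        if score > st.2 then (some pc.1, score) else st) (none, -1)).1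
    match prefer_collection with
    | some p => if p ≠ "" ∧ 0 < collection_counts.getD p 0 then some p else scan
    | none => scan

-- ===== PORT B =====
def pvScore (item : String × Int) : Int := item.2 + pvBonus item.1

def find_best_collection_alt (all_icons : List String) (prefer_collection : Option String) : Option String :=
  let collection_counts := pvCount all_icons
  if collection_counts.items = [] then none
  else
    let ranked := PySem.List.sorted collection_counts.items (fun item => -pvScore item)
    match prefer_collection with
    | some p => if p ≠ "" ∧ 0 < collection_counts.getD p 0 then some p else ranked.head?.map (·.1)
    | none => ranked.head?.map (·.1)

-- ===== PRECONDITION & SPEC =====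
def Spec_find_best_collection (all_icons : List String) (prefer_collection : Option String) (out : Option String) : Prop := out = find_best_collection_alt all_icons prefer_collection
instance (all_icons : List String) (prefer_collection : Option String) (out : Option String) : Decidable (Spec_find_best_collection all_icons prefer_collection out) := by unfold Spec_find_best_collection; infer_instance

-- ===== CLAIM (what is proved, stated in full; the proofs are below) =====
def Claim_equal_find_best_collection : Prop := ∀ (all_icons : List String) (prefer_collection : Option String), Dom_find_best_collection all_icons prefer_collection → Spec_find_best_collection all_icons prefer_collection (find_best_collection all_icons prefer_collection)

-- ===== LEMMAS AND PROOFS =====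

def pvExtract (icon_id : String) : Option String :=
  if PySem.Str.isIn ":" icon_id then some (((PySem.Str.split? icon_id ":").getD []).headD "") else none

lemma pvCount_foldl_eq (xs : List String) : ∀ (d : PySem.Dict String Int),
    xs.foldl (fun d icon_id =>
      if PySem.Str.isIn ":" icon_id then
        d.modify (((PySem.Str.split? icon_id ":").getD []).headD "") 0 (· + 1)
      else d) d
    = (xs.filterMap pvExtract).foldl (fun d x => d.modify x 0 (· + 1)) d := by
  induction xs with
  | nil => intro d; rfl
  | cons x t ih =>
    intro d
    rw [List.foldl_cons, List.filterMap_cons]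
    unfold pvExtract
    by_cases h : PySem.Str.isIn ":" x
    · rw [if_pos h, if_pos h]
      exact ih _
    · rw [if_neg h, if_neg h]
      exact ih _

lemma pvCount_eq_counter (xs : List String) :
    pvCount xs = PySem.Dict.counter (xs.filterMap pvExtract) := by
  rw [PySem.Dict.counter_eq_foldl]
  exact pvCount_foldl_eq xs _

lemma pvBonus_nonneg (c : String) : 0 ≤ pvBonus c := by
  unfold pvBonus
  split
  · rename_i h
    have hm : c ∈ pvPreferred := by
      simpa using h
    fin_cases hm <;> decide
  · exact le_refl 0

lemma counter_item_score_pos (xs : List String) :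
    ∀ p ∈ (PySem.Dict.counter xs).items, 0 < pvScore p := by
  intro p hp
  rw [PySem.Dict.items_counter] at hp
  obtain ⟨k, hk, rfl⟩ := List.mem_map.mp hp
  have hkx : k ∈ xs := (PySem.Set.mem_ofList xs k).mp hk
  have h1 : 0 < xs.count k := List.count_pos_iff.mpr hkx
  have h2 : (1 : Int) ≤ (xs.count k : Int) := by exact_mod_cast h1
  have h3 := pvBonus_nonneg k
  simp only [pvScore]
  linarith

-- proof-side name for A's loop step (definitionally A's lambda after zeta-reduction)
def pvStep (st : Option String × Int) (pc : String × Int) : Option String × Int :=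
  if st.2 < pc.2 + pvBonus pc.1 then (some pc.1, pc.2 + pvBonus pc.1) else st

-- the scan's step and the insertion-sort step operate in lockstep on the head
lemma pv_inv (l : List (String × Int)) : ∀ (m : String × Int) (t : List (String × Int)),
    ∃ m' t',
      l.foldl (fun acc x => PySem.List.insertBy
        (fun a b => decide ((fun item => -pvScore item) a < (fun item => -pvScore item) b)) x acc) (m :: t)
        = m' :: t' ∧
      l.foldl pvStep (some m.1, pvScore m) = (some m'.1, pvScore m') := by
  induction l with
  | nil => intro m t; exact ⟨m, t, rfl, rfl⟩
  | cons x l ih =>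
    intro m t
    by_cases h : pvScore m < pvScore x
    · obtain ⟨m', t', h1, h2⟩ := ih x (m :: t)
      refine ⟨m', t', ?_, ?_⟩
      · simpa [PySem.List.insertBy, h] using h1
      · have hs : pvStep (some m.1, pvScore m) x = (some x.1, pvScore x) := if_pos h
        rw [List.foldl_cons, hs]
        exact h2
    · obtain ⟨m', t', h1, h2⟩ := ih m (PySem.List.insertBy
        (fun a b => decide (-pvScore a < -pvScore b)) x t)
      refine ⟨m', t', ?_, ?_⟩
      · simpa [PySem.List.insertBy, h] using h1
      · have hs : pvStep (some m.1, pvScore m) x = (some m.1, pvScore m) := if_neg h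
        rw [List.foldl_cons, hs]
        exact h2

lemma pv_scan_eq_sorted_head (l : List (String × Int))
    (hpos : ∀ p ∈ l, 0 < pvScore p) :
    (l.foldl pvStep (none, -1)).1
    = (PySem.List.sorted l (fun item => -pvScore item)).head?.map (·.1) := by
  cases l with
  | nil => rfl
  | cons p rest =>
    rw [PySem.List.sorted_eq_foldl_insertBy]
    have hp : 0 < pvScore p := hpos p (List.mem_cons_self ..)
    have hs0 : pvStep (none, -1) p = (some p.1, pvScore p) :=
      if_pos (show (-1 : Int) < pvScore p by linarith)
    obtain ⟨m', t', h1, h2⟩ := pv_inv rest p []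
    rw [List.foldl_cons, List.foldl_cons, hs0,
      show PySem.List.insertBy
        (fun a b => decide ((fun item => -pvScore item) a < (fun item => -pvScore item) b)) p [] = [p] from rfl,
      h1, h2]
    rfl

-- ===== VERDICT (by name: the statement is the Claim_ definition above) =====
theorem find_best_collection_spec : Claim_equal_find_best_collection := by
  intro all_icons prefer_collection _dom
  unfold Spec_find_best_collection find_best_collection find_best_collection_alt
  have hpos : ∀ p ∈ (pvCount all_icons).items, 0 < pvScore p := by
    rw [pvCount_eq_counter]
    exact counter_item_score_pos _
  have hmain := pv_scan_eq_sorted_head (pvCount all_icons).items hpos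
  by_cases hemp : (pvCount all_icons).items = []
  · simp [hemp]
  · cases prefer_collection with
    | none => simpa [hemp] using hmain
    | some p =>
      by_cases hp : p ≠ "" ∧ 0 < (pvCount all_icons).getD p 0
      · simp [hemp, hp]
      · simpa [hemp, hp] using hmain
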